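-- pv_equiv track=rewrite | github.com/prodm93/ig-dashboard-taipy | main.py | _fold_question_phrases
-- ===== SOURCE A (Python) =====
-- QUESTION_PHRASES = {
--     ("por", "que"): "por_que",
--     ("o", "que"): "o_que",
--     ("pra", "que"): "pra_que",
--     ("para", "que"): "para_que",
-- }
--
-- def _fold_question_phrases(tokens):
--     out = []
--     i = 0
--     while i < len(tokens):
--         if i + 1 < len(tokens):
--             pair = (tokens[i], tokens[i + 1])
--             if pair in QUESTION_PHRASES:
--                 out.append(QUESTION_PHRASES[pair])
--                 i += 2
--                 continue
--         out.append(tokens[i])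
--         i += 1
--     return out
-- ===== SOURCE B (Python) =====
-- QUESTION_PHRASES = {
--     ("por", "que"): "por_que",
--     ("o", "que"): "o_que",
--     ("pra", "que"): "pra_que",
--     ("para", "que"): "para_que",
-- }
--
-- def _fold_question_phrases(tokens):
--     out = []
--     for t in tokens:
--         if out and (out[-1], t) in QUESTION_PHRASES:
--             out[-1] = QUESTION_PHRASES[(out[-1], t)]
--         else:
--             out.append(t)
--     return out
-- ===== Notes on version B (the rewrite author's own statement) =====
-- stated objective: simpler
-- what changed: Replaced the index-based look-ahead while-loop (with +1/+2 index jumps) by a single for-loop that uses the output list as a look-behind buffer: each token either merges into the last emitted token or is appended; equivalent because no folded phrase value ever starts a phrase key.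
import Mathlib
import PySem

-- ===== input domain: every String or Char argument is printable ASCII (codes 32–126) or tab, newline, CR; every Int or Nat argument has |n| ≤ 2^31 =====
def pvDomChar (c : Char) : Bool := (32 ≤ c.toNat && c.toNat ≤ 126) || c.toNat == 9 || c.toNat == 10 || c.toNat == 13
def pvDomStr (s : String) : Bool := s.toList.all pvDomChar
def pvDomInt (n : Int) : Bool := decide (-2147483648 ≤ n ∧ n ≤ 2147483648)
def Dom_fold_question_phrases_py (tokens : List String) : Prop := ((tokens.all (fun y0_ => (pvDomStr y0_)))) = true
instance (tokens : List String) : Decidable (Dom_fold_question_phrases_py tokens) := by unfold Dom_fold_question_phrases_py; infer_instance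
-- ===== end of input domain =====

-- B replaces A's index-based look-ahead while-loop by a look-behind for-loop over the
-- tokens that merges each token into the last emitted one when they form a phrase key
-- (objective: simpler decomposition, same cost).

-- ===== PORT A =====
-- the module-level QUESTION_PHRASES dict
def qpDict : PySem.Dict (String × String) String :=
  ((((PySem.Dict.empty).insert ("por", "que") "por_que").insert ("o", "que") "o_que").insert
      ("pra", "que") "pra_que").insert ("para", "que") "para_que"

-- A's while-loop over index i with look-ahead; the remaining suffix tokens[i:] is the state,
-- 'i += 2' drops two elements, 'i += 1' drops one; out is built by appending (here: cons, same order).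
def foldA_go : List String → List String
  | [] => []
  | [a] => [a]
  | a :: b :: rest =>
    match qpDict.get? (a, b) with
    | some v => v :: foldA_go rest
    | none => a :: foldA_go (b :: rest)

def fold_question_phrases_py (tokens : List String) : List String := foldA_go tokens

-- ===== PORT B =====
-- body of B's for-loop: merge t into out's last element if they form a key, else append t
def foldB_step (out : List String) (t : String) : List String :=
  match out.getLast? with
  | some last =>
    match qpDict.get? (last, t) with
    | some v => out.dropLast ++ [v]
    | none => out ++ [t]
  | none => out ++ [t]

def fold_question_phrases_py_alt (tokens : List String) : List String :=
  tokens.foldl foldB_step []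

-- ===== PRECONDITION & SPEC =====
def Spec_fold_question_phrases_py (tokens : List String) (out : List String) : Prop := out = fold_question_phrases_py_alt tokens
instance (tokens : List String) (out : List String) : Decidable (Spec_fold_question_phrases_py tokens out) := by unfold Spec_fold_question_phrases_py; infer_instance

-- ===== CLAIM (what is proved, stated in full; the proofs are below) =====
def Claim_equal_fold_question_phrases_py : Prop := ∀ (tokens : List String), Dom_fold_question_phrases_py tokens → Spec_fold_question_phrases_py tokens (fold_question_phrases_py tokens)

-- ===== LEMMAS AND PROOFS =====

-- a value looked up in QUESTION_PHRASES is one of its four phrase values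
theorem qp_get_mem_values (a b v : String) (hv : qpDict.get? (a, b) = some v) :
    v = "por_que" ∨ v = "o_que" ∨ v = "pra_que" ∨ v = "para_que" := by
  revert hv
  simp [qpDict, PySem.Dict.get?, PySem.Dict.empty, PySem.Dict.insert, Prod.ext_iff]
  tauto

-- folded phrase values never start a phrase key
theorem qp_value_safe (v x : String)
    (h : v = "por_que" ∨ v = "o_que" ∨ v = "pra_que" ∨ v = "para_que") :
    qpDict.get? (v, x) = none := by
  rcases h with h | h | h | h <;> subst h <;>
    simp [qpDict, PySem.Dict.get?, PySem.Dict.empty, PySem.Dict.insert, Prod.ext_iff]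

-- main invariant: if out's last element cannot pair with the head of l, B's fold from out
-- equals out followed by A's fold of l
theorem foldB_eq_foldA (l : List String) :
    ∀ (out : List String),
      (∀ a b t, out.getLast? = some a → l = b :: t → qpDict.get? (a, b) = none) →
      List.foldl foldB_step out l = out ++ foldA_go l := by
  induction l using foldA_go.induct with
  | case1 => intro out _; simp [foldA_go]
  | case2 a =>
    intro out h
    have hstep : foldB_step out a = out ++ [a] := by
      unfold foldB_step
      cases hl : out.getLast? with
      | none => rfl
      | some last => simp [h last a [] hl rfl]
    simp [List.foldl, hstep, foldA_go]
  | case3 a b rest v hv ih =>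
    intro out h
    have hstep : foldB_step out a = out ++ [a] := by
      unfold foldB_step
      cases hl : out.getLast? with
      | none => rfl
      | some last => simp [h last a (b :: rest) hl rfl]
    have hstep2 : foldB_step (out ++ [a]) b = out ++ [v] := by
      unfold foldB_step
      simp only [List.getLast?_concat, hv, List.dropLast_concat]
    have hrec := ih (out ++ [v]) (by
      intro p q t hp hq
      rw [List.getLast?_concat] at hp
      cases hp
      exact qp_value_safe v q (qp_get_mem_values a b v hv))
    rw [List.foldl_cons, hstep, List.foldl_cons, hstep2, hrec]
    simp [foldA_go, hv]
  | case4 a b rest hv ih =>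
    intro out h
    have hstep : foldB_step out a = out ++ [a] := by
      unfold foldB_step
      cases hl : out.getLast? with
      | none => rfl
      | some last => simp [h last a (b :: rest) hl rfl]
    have hrec := ih (out ++ [a]) (by
      intro p q t hp hq
      rw [List.getLast?_concat] at hp
      cases hp
      cases hq
      exact hv)
    rw [List.foldl_cons, hstep, hrec]
    simp [foldA_go, hv]

-- ===== VERDICT (by name: the statement is the Claim_ definition above) =====
theorem fold_question_phrases_py_spec : Claim_equal_fold_question_phrases_py := by
  intro tokens _
  unfold Spec_fold_question_phrases_py fold_question_phrases_py fold_question_phrases_py_alt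
  have h := foldB_eq_foldA tokens [] (by intro a b t hp hq; simp at hp)
  simp at h
  exact h.symm
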